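-- pv_equiv track=rewrite | github.com/Lhogeshwaran/code_practises | rokt.py | split_arrays
-- ===== SOURCE A (Python) =====
-- def split_arrays(arr):
--     # Write your code here
--
--     arr = sorted(arr)
--     left_arr = [arr[0]]
--     arr.pop(0)
--     max_check = 0
--
--     while sum(left_arr) < sum(arr):
--         left_arr.append(arr.pop(0))
--         max_check += 1
--
--     return max_check
-- ===== SOURCE B (Python) =====
-- def split_arrays(arr):
--     s = sorted(arr)
--     total = sum(s)
--     prefix = 0
--     for i, x in enumerate(s):
--         prefix += x
--         if 2 * prefix >= total:
--             return i
--     raise ValueError("no valid split")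
-- ===== Notes on version B (the rewrite author's own statement) =====
-- stated objective: alternative
-- what changed: B sorts once and scans with an incrementally maintained prefix sum (2*prefix >= total test), instead of A's while-loop that re-sums both the growing left list and the shrinking remainder on every iteration.
-- outside the precondition, e.g. on split_arrays([]): A raises IndexError, B raises ValueError; on split_arrays([-1]): A raises IndexError, B raises ValueError
import Mathlib
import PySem

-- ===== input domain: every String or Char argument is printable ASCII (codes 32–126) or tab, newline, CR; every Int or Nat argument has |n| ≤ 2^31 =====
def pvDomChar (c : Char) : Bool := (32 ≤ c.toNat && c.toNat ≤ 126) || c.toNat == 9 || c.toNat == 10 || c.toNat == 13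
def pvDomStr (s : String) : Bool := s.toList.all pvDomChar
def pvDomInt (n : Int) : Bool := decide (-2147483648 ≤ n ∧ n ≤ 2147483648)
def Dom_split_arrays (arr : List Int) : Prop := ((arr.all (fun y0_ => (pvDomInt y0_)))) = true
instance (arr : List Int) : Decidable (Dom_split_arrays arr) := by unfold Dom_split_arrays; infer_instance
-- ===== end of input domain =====

-- B: one sorted pass with an incremental prefix sum instead of re-summing both lists each iteration (objective: alternative).
-- ===== PORT A =====
-- while sum(left_arr) < sum(arr): left_arr.append(arr.pop(0)); max_check += 1
def splitArraysLoopA (left rest : List Int) (max_check : Int) : Int :=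
  if left.sum < rest.sum then
    match rest with
    | [] => 0            -- Python: arr.pop(0) raises IndexError here (excluded by Pre_)
    | x :: rs => splitArraysLoopA (left ++ [x]) rs (max_check + 1)
  else max_check
termination_by rest.length

def split_arrays (arr : List Int) : Int :=
  match PySem.List.sorted arr (fun x => x) false with
  | [] => 0              -- Python: arr[0] raises IndexError (excluded by Pre_)
  | x :: rest => splitArraysLoopA [x] rest 0

-- ===== PORT B =====
-- for i, x in enumerate(s): prefix += x; if 2*prefix >= total: return i
def splitArraysLoopB (rest : List Int) (i prefixSum total : Int) : Int :=
  match rest with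
  | [] => 0              -- Python: raise ValueError (excluded by Pre_)
  | x :: rs => if 2 * (prefixSum + x) ≥ total then i
               else splitArraysLoopB rs (i + 1) (prefixSum + x) total

def split_arrays_alt (arr : List Int) : Int :=
  let s := PySem.List.sorted arr (fun x => x) false
  splitArraysLoopB s 0 0 s.sum

-- ===== PRECONDITION & SPEC =====
-- Pre_: exactly the inputs on which Python A returns (both programs raise elsewhere:
-- A IndexError, B ValueError): some prefix of the sorted list already weighs at least half the total.
def Pre_split_arrays (arr : List Int) : Prop :=
  arr ≠ [] ∧ ∃ k, k < arr.length ∧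
    2 * ((PySem.List.sorted arr (fun x => x) false).take (k + 1)).sum ≥ arr.sum
instance (arr : List Int) : Decidable (Pre_split_arrays arr) := by
  unfold Pre_split_arrays; infer_instance
def pvWitness_split_arrays : List Int := [3, 1, 2]

def Spec_split_arrays (arr : List Int) (out : Int) : Prop := out = split_arrays_alt arr
instance (arr : List Int) (out : Int) : Decidable (Spec_split_arrays arr out) := by unfold Spec_split_arrays; infer_instance

-- ===== CLAIM (what is proved, stated in full; the proofs are below) =====
def Claim_equal_split_arrays : Prop := ∀ (arr : List Int), Dom_split_arrays arr → Pre_split_arrays arr → Spec_split_arrays arr (split_arrays arr)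

-- ===== LEMMAS AND PROOFS =====

-- A's loop, with state (left, rest), equals B's loop on (rest) once the while-test on the
-- two sums is rephrased as 2*left.sum ≥ total (total = left.sum + rest.sum is invariant).
lemma loopB_cons (x : Int) (rs : List Int) (i p t : Int) :
    splitArraysLoopB (x :: rs) i p t =
      if 2 * (p + x) ≥ t then i else splitArraysLoopB rs (i + 1) (p + x) t := rfl

lemma loopA_eq_loopB (rest : List Int) : ∀ (left : List Int) (mc : Int),
    splitArraysLoopA left rest mc =
      if 2 * left.sum ≥ left.sum + rest.sum then mc
      else splitArraysLoopB rest (mc + 1) left.sum (left.sum + rest.sum) := by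
  induction rest with
  | nil =>
    intro left mc
    simp only [splitArraysLoopA, splitArraysLoopB, List.sum_nil]
    split_ifs with h1 h2 <;> omega
  | cons x rs ih =>
    intro left mc
    rw [splitArraysLoopA]
    by_cases h : left.sum < (x :: rs).sum
    · rw [if_pos h, ih, loopB_cons]
      simp only [List.sum_append, List.sum_cons, List.sum_nil,
        add_zero, add_assoc] at h ⊢
      split_ifs <;> first | rfl | omega
    · rw [if_neg h, if_pos (by simp only [List.sum_cons] at h ⊢; omega)]

-- ===== VERDICT (by name: the statement is the Claim_ definition above) =====
theorem split_arrays_spec : Claim_equal_split_arrays := by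
  intro arr _ _
  unfold Spec_split_arrays split_arrays split_arrays_alt
  cases hs : PySem.List.sorted arr (fun x => x) false with
  | nil => rfl
  | cons x rest =>
    show splitArraysLoopA [x] rest 0 = splitArraysLoopB (x :: rest) 0 0 (x :: rest).sum
    rw [loopA_eq_loopB, loopB_cons]
    simp only [List.sum_cons, List.sum_nil, zero_add, add_zero]
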